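-- pv_equiv track=rewrite | github.com/gostreap/wilson_algorithm | wilson.py | remove_cycles
-- ===== SOURCE A (Python) =====
-- def remove_cycles(path):
--     no_cycle = False
--     while not no_cycle:
--         no_cycle = True
--         for i in range(len(path)):
--             for j in range(i+1, len(path)):
--                 if path[i] == path[j]:
--                     no_cycle = False
--                     path = [path[k]
--                             for k in range(len(path)) if not (k >= i and k < j)]
--                     break
--             if not no_cycle:
--                 break
--     return path
-- ===== SOURCE B (Python) =====
-- def remove_cycles(path):
--     # One forward pass of loop erasure: keep a stack of the simple path so far;
--     # on a repeated vertex, cut the stack back to its first occurrence.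
--     out = []
--     for x in path:
--         if x in out:
--             out = out[:out.index(x) + 1]
--         else:
--             out.append(x)
--     return out
-- ===== Notes on version B (the rewrite author's own statement) =====
-- stated objective: faster
-- what changed: Replaced the restart-from-scratch nested scans (find first repeated pair, splice, rescan) by a single forward pass that keeps the loop-erased prefix as a stack and truncates it at the first occurrence of a repeated vertex.
import Mathlib
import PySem

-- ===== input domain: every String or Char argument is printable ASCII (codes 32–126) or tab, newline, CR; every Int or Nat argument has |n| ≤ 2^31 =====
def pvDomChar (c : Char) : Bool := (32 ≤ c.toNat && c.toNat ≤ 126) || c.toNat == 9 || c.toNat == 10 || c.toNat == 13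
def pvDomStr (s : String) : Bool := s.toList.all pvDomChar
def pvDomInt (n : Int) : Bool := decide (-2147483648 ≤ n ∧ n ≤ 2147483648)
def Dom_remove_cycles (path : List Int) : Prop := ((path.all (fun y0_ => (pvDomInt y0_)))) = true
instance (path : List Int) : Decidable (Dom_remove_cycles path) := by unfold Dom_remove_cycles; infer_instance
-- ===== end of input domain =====

-- B replaces A's repeated rescan-and-splice with a single forward loop-erasure pass (stack kept, truncated at a repeat); return-value equivalence only (A rebinds its local, no caller-visible mutation).

-- ===== PORT A =====
-- inner 'for j in range(i+1, len(path))' with break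
def pvInnerLoop (path : List Int) (i : Nat) (j : Nat) : Option Nat :=
  if _h : j < path.length then
    if path.getD i 0 == path.getD j 0 then some j
    else pvInnerLoop path i (j + 1)
  else none
termination_by path.length - j

-- outer 'for i in range(len(path))' with break
def pvOuterLoop (path : List Int) (i : Nat) : Option (Nat × Nat) :=
  if _h : i < path.length then
    match pvInnerLoop path i (i + 1) with
    | some j => some (i, j)
    | none => pvOuterLoop path (i + 1)
  else none
termination_by path.length - i

-- bounds needed for the termination of remove_cycles (cited in decreasing_by)
theorem pvInnerLoop_some_lt {path : List Int} {i j0 j : Nat}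
    (h : pvInnerLoop path i j0 = some j) : j0 ≤ j ∧ j < path.length := by
  fun_induction pvInnerLoop path i j0 with
  | case1 j0 hlt heq =>
      injection h with h
      exact ⟨Nat.le_of_eq h, h ▸ hlt⟩
  | case2 j0 hlt hne ih =>
      obtain ⟨h1, h2⟩ := ih h
      exact ⟨by omega, h2⟩
  | case3 j0 hlt => simp at h

theorem pvOuterLoop_some_lt {path : List Int} {i0 i j : Nat}
    (h : pvOuterLoop path i0 = some (i, j)) : i0 ≤ i ∧ i < j ∧ j < path.length := by
  fun_induction pvOuterLoop path i0 with
  | case1 i0 hlt j' heq =>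
      obtain ⟨h1, h2⟩ := pvInnerLoop_some_lt heq
      simp only [Option.some.injEq, Prod.mk.injEq] at h
      obtain ⟨rfl, rfl⟩ := h
      exact ⟨le_refl _, by omega, h2⟩
  | case2 i0 hlt heq ih =>
      obtain ⟨h1, h2, h3⟩ := ih h
      exact ⟨by omega, h2, h3⟩
  | case3 i0 hlt => simp at h

def remove_cycles (path : List Int) : List Int :=
  match h : pvOuterLoop path 0 with
  | none => path
  | some (i, j) =>
      remove_cycles (((List.range path.length).filter
        (fun k => !(decide (k ≥ i) && decide (k < j)))).map (fun k => path.getD k 0))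
termination_by path.length
decreasing_by
  obtain ⟨-, hij, hj⟩ := pvOuterLoop_some_lt h
  rw [List.length_map]
  have hmem : i ∈ List.range path.length := List.mem_range.mpr (by omega)
  calc ((List.range path.length).filter (fun k => !(decide (k ≥ i) && decide (k < j)))).length
      < (List.range path.length).length := by
        rw [List.length_filter_lt_length_iff_exists]
        exact ⟨i, hmem, by simp; omega⟩
    _ = path.length := List.length_range

-- ===== PORT B =====
def pvErase (out : List Int) (rest : List Int) : List Int :=
  match rest with
  | [] => out
  | x :: xs =>
      match PySem.List.index? out x with
      | some k => pvErase (out.take (k + 1)) xs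
      | none => pvErase (out ++ [x]) xs

def remove_cycles_alt (path : List Int) : List Int := pvErase [] path

-- ===== PRECONDITION & SPEC =====
def Spec_remove_cycles (path : List Int) (out : List Int) : Prop := out = remove_cycles_alt path
instance (path : List Int) (out : List Int) : Decidable (Spec_remove_cycles path out) := by unfold Spec_remove_cycles; infer_instance

-- ===== CLAIM (what is proved, stated in full; the proofs are below) =====
def Claim_equal_remove_cycles : Prop := ∀ (path : List Int), Dom_remove_cycles path → Spec_remove_cycles path (remove_cycles path)

-- ===== LEMMAS AND PROOFS =====

theorem pvInnerLoop_none_char {path : List Int} {i j0 : Nat}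
    (h : pvInnerLoop path i j0 = none) :
    ∀ b, j0 ≤ b → b < path.length → path.getD i 0 ≠ path.getD b 0 := by
  fun_induction pvInnerLoop path i j0 with
  | case1 j0 hlt heq => simp at h
  | case2 j0 hlt hne ih =>
      intro b hb1 hb2
      rcases Nat.eq_or_lt_of_le hb1 with rfl | hlt'
      · simpa using hne
      · exact ih h b (by omega) hb2
  | case3 j0 hlt => intro b hb1 hb2; omega

theorem pvInnerLoop_some_min {path : List Int} {i j0 j : Nat}
    (h : pvInnerLoop path i j0 = some j) :
    path.getD i 0 = path.getD j 0 ∧ ∀ b, j0 ≤ b → b < j → path.getD i 0 ≠ path.getD b 0 := by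
  fun_induction pvInnerLoop path i j0 with
  | case1 j0 hlt heq =>
      injection h with h
      subst h
      exact ⟨by simpa using heq, fun b hb1 hb2 => by omega⟩
  | case2 j0 hlt hne ih =>
      obtain ⟨h1, h2⟩ := ih h
      refine ⟨h1, fun b hb1 hb2 => ?_⟩
      rcases Nat.eq_or_lt_of_le hb1 with rfl | hlt'
      · simpa using hne
      · exact h2 b (by omega) hb2
  | case3 j0 hlt => simp at h

theorem pvOuterLoop_none_char {path : List Int} {i0 : Nat}
    (h : pvOuterLoop path i0 = none) :
    ∀ a b, i0 ≤ a → a < b → b < path.length → path.getD a 0 ≠ path.getD b 0 := by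
  fun_induction pvOuterLoop path i0 with
  | case1 i0 hlt j' heq => simp at h
  | case2 i0 hlt heq ih =>
      intro a b ha hab hb
      rcases Nat.eq_or_lt_of_le ha with rfl | hlt'
      · exact pvInnerLoop_none_char heq b (by omega) hb
      · exact ih h a b (by omega) hab hb
  | case3 i0 hlt => intro a b ha hab hb; omega

theorem pvOuterLoop_some_min {path : List Int} {i0 i j : Nat}
    (h : pvOuterLoop path i0 = some (i, j)) :
    path.getD i 0 = path.getD j 0 ∧
    (∀ b, i < b → b < j → path.getD i 0 ≠ path.getD b 0) ∧
    (∀ a b, i0 ≤ a → a < i → a < b → b < path.length → path.getD a 0 ≠ path.getD b 0) := by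
  fun_induction pvOuterLoop path i0 with
  | case1 i0 hlt j' heq =>
      simp only [Option.some.injEq, Prod.mk.injEq] at h
      obtain ⟨rfl, rfl⟩ := h
      obtain ⟨h1, h2⟩ := pvInnerLoop_some_min heq
      exact ⟨h1, fun b hb1 hb2 => h2 b (by omega) hb2, fun a b ha1 ha2 _ _ => by omega⟩
  | case2 i0 hlt heq ih =>
      obtain ⟨h1, h2, h3⟩ := ih h
      refine ⟨h1, h2, fun a b ha1 ha2 hab hb => ?_⟩
      rcases Nat.eq_or_lt_of_le ha1 with rfl | hlt'
      · exact pvInnerLoop_none_char heq b (by omega) hb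
      · exact h3 a b (by omega) ha2 hab hb
  | case3 i0 hlt => simp at h

theorem pvErase_append (out p q : List Int) :
    pvErase out (p ++ q) = pvErase (pvErase out p) q := by
  induction p generalizing out with
  | nil => rfl
  | cons x xs ih =>
      simp only [List.cons_append, pvErase]
      cases PySem.List.index? out x with
      | some k => exact ih _
      | none => exact ih _

theorem pvErase_nodup (p : List Int) : ∀ out : List Int, p.Nodup →
    (∀ x ∈ p, x ∉ out) → pvErase out p = out ++ p := by
  induction p with
  | nil => intro out _ _; simp [pvErase]
  | cons x xs ih =>
      intro out hnd hdisj
      have hx : x ∉ out := hdisj x (by simp)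
      rw [pvErase, (PySem.List.index?_eq_none_iff _ _).mpr hx]
      rw [ih (out ++ [x]) (List.Nodup.of_cons hnd)]
      · simp
      · intro y hy
        simp only [List.mem_append, List.mem_singleton]
        rintro (hyo | rfl)
        · exact hdisj y (by simp [hy]) hyo
        · exact (List.nodup_cons.mp hnd).1 hy

theorem pvErase_ext (m : List Int) : ∀ pre t : List Int, (∀ x ∈ m, x ∉ pre) →
    ∃ t', (∀ x ∈ t', x ∈ m ∨ x ∈ t) ∧ pvErase (pre ++ t) m = pre ++ t' := by
  induction m with
  | nil => intro pre t _; exact ⟨t, fun x hx => Or.inr hx, rfl⟩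
  | cons x xs ih =>
      intro pre t hdisj
      have hxpre : x ∉ pre := hdisj x (by simp)
      cases hidx : PySem.List.index? (pre ++ t) x with
      | none =>
          obtain ⟨t', ht1, ht2⟩ := ih pre (t ++ [x]) (fun y hy => hdisj y (by simp [hy]))
          refine ⟨t', fun y hy => ?_, ?_⟩
          · rcases ht1 y hy with h | h
            · exact Or.inl (by simp [h])
            · rcases List.mem_append.mp h with h | h
              · exact Or.inr h
              · simp at h; subst h; exact Or.inl (by simp)
          · rw [pvErase, hidx, ← ht2, List.append_assoc]
      | some k =>
          obtain ⟨hk, hkx, hmin⟩ := PySem.List.getElem_of_index?_eq_some hidx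
          have hkge : pre.length ≤ k := by
            by_contra hlt
            push_neg at hlt
            have h1 : (pre ++ t)[k] = pre[k]'(by omega) := List.getElem_append_left hlt
            exact hxpre (hkx ▸ h1 ▸ List.getElem_mem _)
          have htake : (pre ++ t).take (k + 1) = pre ++ t.take (k + 1 - pre.length) := by
            rw [List.take_append, List.take_of_length_le (by omega)]
          obtain ⟨t', ht1, ht2⟩ := ih pre (t.take (k + 1 - pre.length))
            (fun y hy => hdisj y (by simp [hy]))
          refine ⟨t', fun y hy => ?_, ?_⟩
          · rcases ht1 y hy with h | h
            · exact Or.inl (by simp [h])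
            · exact Or.inr (List.mem_of_mem_take h)
          · rw [pvErase, hidx]
            show pvErase (List.take (k + 1) (pre ++ t)) xs = pre ++ t'
            rw [htake, ht2]

theorem filter_range_split (n i j : Nat) (hij : i ≤ j) (hj : j ≤ n) :
    (List.range n).filter (fun k => !(decide (k ≥ i) && decide (k < j))) =
      List.range i ++ List.range' j (n - j) := by
  have e1 : List.range' i (j - i) ++ List.range' j (n - j) = List.range' i (n - i) := by
    have h := @List.range'_append i (j - i) (n - j) 1
    rw [show i + 1 * (j - i) = j by omega, show j - i + (n - j) = n - i by omega] at h
    exact h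
  have e0 : List.range' 0 i ++ List.range' i (n - i) = List.range' 0 n := by
    have h := @List.range'_append 0 i (n - i) 1
    rw [show 0 + 1 * i = i by omega, show i + (n - i) = n by omega] at h
    exact h
  have hr : List.range n = List.range' 0 i ++ (List.range' i (j - i) ++ List.range' j (n - j)) := by
    rw [List.range_eq_range', ← e0, e1]
  have f1 : (List.range' 0 i).filter (fun k => !(decide (k ≥ i) && decide (k < j)))
      = List.range' 0 i := by
    refine List.filter_eq_self.mpr fun a ha => ?_
    rw [List.mem_range'_1] at ha
    simp only [ge_iff_le, Bool.not_eq_eq_eq_not, Bool.not_true, Bool.and_eq_false_imp,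
      decide_eq_true_eq, decide_eq_false_iff_not, not_lt]
    omega
  have f2 : (List.range' i (j - i)).filter (fun k => !(decide (k ≥ i) && decide (k < j)))
      = [] := by
    refine List.filter_eq_nil_iff.mpr fun a ha => ?_
    rw [List.mem_range'_1] at ha
    simp only [ge_iff_le, Bool.not_eq_eq_eq_not, Bool.not_true, Bool.and_eq_false_imp,
      decide_eq_true_eq, decide_eq_false_iff_not, not_lt]
    omega
  have f3 : (List.range' j (n - j)).filter (fun k => !(decide (k ≥ i) && decide (k < j)))
      = List.range' j (n - j) := by
    refine List.filter_eq_self.mpr fun a ha => ?_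
    rw [List.mem_range'_1] at ha
    simp only [ge_iff_le, Bool.not_eq_eq_eq_not, Bool.not_true, Bool.and_eq_false_imp,
      decide_eq_true_eq, decide_eq_false_iff_not, not_lt]
    omega
  rw [hr, List.filter_append, List.filter_append, f1, f2, f3, List.nil_append,
    List.range_eq_range']

theorem map_range_getD_take (path : List Int) (i : Nat) (h : i ≤ path.length) :
    (List.range i).map (fun k => path.getD k 0) = path.take i := by
  apply List.ext_getElem
  · simp; omega
  · intro n h1 h2
    simp only [List.getElem_map, List.getElem_range, List.getElem_take]
    exact List.getD_eq_getElem _ _ (by simp at h1; omega)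

theorem map_range'_getD_drop (path : List Int) (j : Nat) (h : j ≤ path.length) :
    (List.range' j (path.length - j)).map (fun k => path.getD k 0) = path.drop j := by
  apply List.ext_getElem
  · simp
  · intro n h1 h2
    simp only [List.getElem_map, List.getElem_range', Nat.one_mul, List.getElem_drop]
    exact List.getD_eq_getElem _ _ (by simp at h1; omega)

theorem rebuild_eq (path : List Int) (i j : Nat) (hij : i ≤ j) (hj : j ≤ path.length) :
    ((List.range path.length).filter (fun k => !(decide (k ≥ i) && decide (k < j)))).map
        (fun k => path.getD k 0) = path.take i ++ path.drop j := by
  rw [filter_range_split _ _ _ hij hj, List.map_append,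
    map_range_getD_take _ _ (by omega), map_range'_getD_drop _ _ hj]

theorem nodup_of_outer_none {path : List Int} (h : pvOuterLoop path 0 = none) :
    path.Nodup := by
  have hc := pvOuterLoop_none_char h
  refine List.pairwise_iff_getElem.mpr fun a b ha hb hab => ?_
  have := hc a b (Nat.zero_le _) hab hb
  rwa [List.getD_eq_getElem _ _ ha, List.getD_eq_getElem _ _ hb] at this

theorem remove_cycles_key : ∀ (path : List Int), remove_cycles path = pvErase [] path := by
  intro path
  fun_induction remove_cycles path with
  | case1 path h =>
      rw [pvErase_nodup path [] (nodup_of_outer_none h) (by simp), List.nil_append]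
  | case2 path i j h ih =>
      obtain ⟨-, hij, hjlen⟩ := pvOuterLoop_some_lt h
      obtain ⟨heq, hminj, hmini⟩ := pvOuterLoop_some_min h
      have hilen : i < path.length := by omega
      -- getD → getElem
      have hgd : ∀ (a : Nat) (ha : a < path.length), path.getD a 0 = path[a] :=
        fun a ha => List.getD_eq_getElem _ _ ha
      have heq' : path[i] = path[j] := by rw [← hgd i hilen, ← hgd j hjlen]; exact heq
      have hminj' : ∀ b (hb1 : i < b) (hb2 : b < j), path[i] ≠ path[b]'(by omega) := by
        intro b hb1 hb2
        have := hminj b hb1 hb2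
        rwa [hgd i hilen, hgd b (by omega)] at this
      have hmini' : ∀ a b (ha : a < i) (hab : a < b) (hb : b < path.length),
          path[a]'(by omega) ≠ path[b] := by
        intro a b ha hab hb
        have := hmini a b (Nat.zero_le _) ha hab hb
        rwa [hgd a (by omega), hgd b hb] at this
      set P := path.take i with hP
      set M := (path.drop (i + 1)).take (j - (i + 1)) with hM
      set S := path.drop (j + 1) with hS
      have hPv : P ++ [path[i]] = path.take (i + 1) := by
        rw [List.take_add_one, List.getElem?_eq_getElem hilen]; rfl
      -- decomposition of path
      have hdropj : path.drop j = path[i] :: S := by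
        rw [List.drop_eq_getElem_cons hjlen, heq']
      have hsplit : path = (P ++ [path[i]]) ++ (M ++ path[i] :: S) := by
        conv_lhs => rw [← List.take_append_drop i path]
        rw [List.drop_eq_getElem_cons hilen]
        have h3 : path.drop (i + 1) = M ++ path.drop j := by
          conv_lhs => rw [← List.take_append_drop (j - (i + 1)) (path.drop (i + 1))]
          rw [List.drop_drop, show i + 1 + (j - (i + 1)) = j by omega]
        rw [h3, hdropj, List.append_assoc, List.singleton_append, hP]
      -- membership facts
      have hmemP : ∀ x ∈ P, ∃ a, ∃ (ha : a < i), path[a]'(by omega) = x := by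
        intro x hx
        obtain ⟨a, ha, hax⟩ := List.mem_iff_getElem.mp hx
        have ha' : a < i := by simp [hP] at ha; omega
        exact ⟨a, ha', by rw [← hax]; exact (List.getElem_take).symm⟩
      have hmemM : ∀ x ∈ M, ∃ b, ∃ (hb : b < j), i < b ∧ path[b]'(by omega) = x := by
        intro x hx
        obtain ⟨k, hk, hkx⟩ := List.mem_iff_getElem.mp hx
        have hk' : k < j - (i + 1) := by simp [hM] at hk; omega
        refine ⟨i + 1 + k, by omega, by omega, ?_⟩
        rw [← hkx]
        simp only [hM, List.getElem_take, List.getElem_drop]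
      have hvP : path[i] ∉ P := by
        intro hmem
        obtain ⟨a, ha, hax⟩ := hmemP _ hmem
        exact hmini' a i ha ha hilen hax
      have hnodupPv : (P ++ [path[i]]).Nodup := by
        rw [hPv]
        refine List.pairwise_iff_getElem.mpr fun a b ha hb hab => ?_
        have hlen : (path.take (i + 1)).length = i + 1 := by simp; omega
        rw [hlen] at ha hb
        simp only [List.getElem_take]
        exact hmini' a b (by omega) hab (by omega)
      have hMnotPv : ∀ x ∈ M, x ∉ P ++ [path[i]] := by
        intro x hx hmem
        obtain ⟨b, hb, hib, hbx⟩ := hmemM x hx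
        rcases List.mem_append.mp hmem with hp | hv
        · obtain ⟨a, ha, hax⟩ := hmemP x hp
          exact hmini' a b ha (by omega) (by omega) (by rw [hax, hbx])
        · simp only [List.mem_singleton] at hv
          exact hminj' b hib hb (by rw [hbx, hv])
      have hvM : path[i] ∉ M := by
        intro hmem
        obtain ⟨b, hb, hib, hbx⟩ := hmemM _ hmem
        exact hminj' b hib hb hbx.symm
      -- the B-side collapse: pvErase [] path = pvErase (P ++ [path[i]]) S
      obtain ⟨T, hT, hTe⟩ := pvErase_ext M (P ++ [path[i]]) [] hMnotPv
      rw [List.append_nil] at hTe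
      have hvT : path[i] ∉ T := by
        intro hmem
        rcases hT _ hmem with hm | hnil
        · exact hvM hm
        · simp at hnil
      have hidxv : PySem.List.index? ((P ++ [path[i]]) ++ T) path[i] = some P.length := by
        rw [PySem.List.index?_append_of_mem T (by simp),
          PySem.List.index?_append_singleton_self P path[i] hvP]
      have htakePv : ((P ++ [path[i]]) ++ T).take (P.length + 1) = P ++ [path[i]] := by
        rw [show P.length + 1 = (P ++ [path[i]]).length by simp, List.take_left]
      have hchain : pvErase [] path = pvErase (P ++ [path[i]]) S := by
        conv_lhs => rw [hsplit]
        rw [pvErase_append, pvErase_nodup _ [] hnodupPv (by simp), List.nil_append]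
        have hsplit2 : M ++ path[i] :: S = M ++ ([path[i]] ++ S) := by simp
        rw [hsplit2, pvErase_append, hTe, pvErase_append, pvErase, hidxv]
        show pvErase (((P ++ [path[i]]) ++ T).take (P.length + 1)) S = _
        rw [htakePv]
      -- the A-side: rebuilt list = take i ++ drop j, then collapse the same way
      rw [ih, rebuild_eq path i j (by omega) (by omega), hdropj, hchain]
      have : P ++ path[i] :: S = (P ++ [path[i]]) ++ S := by simp
      rw [this, pvErase_append, pvErase_nodup _ [] hnodupPv (by simp), List.nil_append]

-- ===== VERDICT (by name: the statement is the Claim_ definition above) =====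
theorem remove_cycles_spec : Claim_equal_remove_cycles := by
  intro path _
  unfold Spec_remove_cycles remove_cycles_alt
  exact remove_cycles_key path
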